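-- pv_equiv track=rewrite | github.com/JamesWo/Algorithms | topcoder/division2-2/UndoHistory.l2.SRM579.py | useHistory
-- ===== SOURCE A (Python) =====
-- def useHistory(word, seen):
--     count = 0
--     for i in range(len(word), -1, -1):
--         if word[0:i] in seen:
--             for j in range(i+1, len(word)+1):
--                 seen.add(word[0:j])
--                 count += 1
--             return count + 3
--     assert False
-- ===== SOURCE B (Python) =====
-- def useHistory(word, seen):
--     # scan the seen set itself: the longest seen prefix is the longest
--     # element of seen that word starts with
--     best = max((len(s) for s in seen if word.startswith(s)), default=None)
--     assert best is not None
--     for j in range(best + 1, len(word) + 1):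
--         seen.add(word[:j])
--     return len(word) - best + 3
-- ===== Notes on version B (the rewrite author's own statement) =====
-- stated objective: alternative
-- what changed: Instead of enumerating prefix lengths and testing membership, B scans the seen set itself, taking the maximum length of an element of seen that word starts with, and returns the closed form len(word) - best + 3; the set update is a separate decoupled loop.
import Mathlib
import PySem

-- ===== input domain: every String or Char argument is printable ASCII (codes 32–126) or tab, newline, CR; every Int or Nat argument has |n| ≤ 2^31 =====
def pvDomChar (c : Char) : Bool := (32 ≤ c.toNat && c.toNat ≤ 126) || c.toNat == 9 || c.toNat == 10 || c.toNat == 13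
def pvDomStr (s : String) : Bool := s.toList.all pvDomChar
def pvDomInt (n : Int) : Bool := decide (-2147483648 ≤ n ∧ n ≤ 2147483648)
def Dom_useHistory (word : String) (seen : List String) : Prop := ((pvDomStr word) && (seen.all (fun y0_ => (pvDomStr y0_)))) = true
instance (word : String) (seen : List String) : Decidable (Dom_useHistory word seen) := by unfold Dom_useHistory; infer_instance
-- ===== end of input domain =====

-- B scans the seen set itself (max length of an element of seen that word starts with)
-- instead of A's enumeration of prefix lengths with membership tests; both Pythons also
-- add the same longer prefixes to the mutable set `seen` (equivalence is about the return value).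


-- ===== PORT A =====
-- outer 'for i in range(len(word), -1, -1)' with early return; the '[] => 0' arm is
-- Python's 'assert False' (AssertionError), excluded by Pre_useHistory
def useHistoryLoopA (word : String) (seen : List String) : List Int → Int
  | [] => 0
  | i :: rest =>
    if PySem.Str.slice word (some 0) (some i) ∈ seen then
      -- inner loop: 'seen.add(word[0:j]); count += 1' over range(i+1, len(word)+1)
      ((PySem.List.pyRange (i + 1) (PySem.Str.len word + 1) 1).foldl
        (fun (st : PySem.Set String × Int) j =>
          (PySem.Set.add st.1 (PySem.Str.slice word (some 0) (some j)), st.2 + 1))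
        (seen, 0)).2 + 3
    else useHistoryLoopA word seen rest

def useHistory (word : String) (seen : List String) : Int :=
  useHistoryLoopA word seen (PySem.List.pyRange (PySem.Str.len word) (-1) (-1))

-- ===== PORT B =====
def useHistory_alt (word : String) (seen : List String) : Int :=
  -- 'max((len(s) for s in seen if word.startswith(s)), default=None)'
  let best : Option Int :=
    PySem.List.max?
      ((seen.filter (fun s => PySem.Str.startswith word s)).map (fun s => PySem.Str.len s))
      (fun x => x)
  match best with
  | none => 0          -- 'assert best is not None' (AssertionError), excluded by Pre_useHistory
  | some b =>
    -- Source B's second loop 'seen.add(word[:j])' only mutates seen; the return value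
    -- is the closed form
    PySem.Str.len word - b + 3

-- ===== PRECONDITION & SPEC =====
-- Pre_: some prefix of word (possibly the empty one) is in seen;
-- on all other inputs both A and B raise AssertionError.
def Pre_useHistory (word : String) (seen : List String) : Prop :=
  ∃ i < word.toList.length + 1, String.ofList (word.toList.take i) ∈ seen
instance (word : String) (seen : List String) : Decidable (Pre_useHistory word seen) := by
  unfold Pre_useHistory; infer_instance
def pvWitness_useHistory : String × List String := ("ab", ["a"])

def Spec_useHistory (word : String) (seen : List String) (out : Int) : Prop := out = useHistory_alt word seen
instance (word : String) (seen : List String) (out : Int) : Decidable (Spec_useHistory word seen out) := by unfold Spec_useHistory; infer_instance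

-- ===== CLAIM (what is proved, stated in full; the proofs are below) =====
def Claim_equal_useHistory : Prop := ∀ (word : String) (seen : List String), Dom_useHistory word seen → Pre_useHistory word seen → Spec_useHistory word seen (useHistory word seen)

-- ===== LEMMAS AND PROOFS =====

-- the second component of A's inner fold counts the iterations
theorem snd_foldl_pair_count {α β : Type} (g : PySem.Set β × Int → α → PySem.Set β)
    (l : List α) (s : PySem.Set β) (c : Int) :
    (l.foldl (fun (st : PySem.Set β × Int) j => (g st j, st.2 + 1)) (s, c)).2 = c + l.length := by
  induction l generalizing s c with
  | nil => simp
  | cons x xs ih => simp [List.foldl_cons, ih]; omega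

-- A's loop is first-match over its index list, with value |range(i+1, n+1)| + 3 at the match
theorem loopA_eq_find (word : String) (seen : List String) (l : List Int) :
    useHistoryLoopA word seen l =
      match l.find? (fun i => decide (PySem.Str.slice word (some 0) (some i) ∈ seen)) with
      | some i =>
          ((PySem.List.pyRange (i + 1) (PySem.Str.len word + 1) 1).length : Int) + 3
      | none => 0 := by
  induction l with
  | nil => rfl
  | cons i rest ih =>
    by_cases h : PySem.Str.slice word (some 0) (some i) ∈ seen
    · simp [useHistoryLoopA, h, snd_foldl_pair_count]
    · simp [useHistoryLoopA, h, ih]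

-- on a strictly descending list, the first match is the greatest match
theorem find?_pairwise_gt_max (p : Int → Bool) :
    ∀ (l : List Int), l.Pairwise (· > ·) → ∀ i, l.find? p = some i →
      ∀ x ∈ l, p x = true → x ≤ i := by
  intro l hp i hf x hx hpx
  induction l with
  | nil => cases hx
  | cons a t ih =>
    rw [List.pairwise_cons] at hp
    rw [List.find?_cons] at hf
    by_cases ha : p a
    · simp [ha] at hf
      rcases List.mem_cons.mp hx with h | h
      · omega
      · have := hp.1 x h; omega
    · simp [ha] at hf
      rcases List.mem_cons.mp hx with h | h
      · subst h; exact absurd hpx (by simp [ha])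
      · exact ih hp.2 hf h

-- the slice word[0:b] for a nonnegative in-range b is the b.toNat-prefix as a string
theorem slice_zero_toList (word : String) (b : Int) (hb : 0 ≤ b) :
    (PySem.Str.slice word (some 0) (some b)).toList = word.toList.take b.toNat := by
  obtain ⟨k, rfl⟩ : ∃ k : Nat, b = (k : Int) := ⟨b.toNat, by omega⟩
  simp

-- membership in B's length list characterised
theorem mem_lenList_iff (word : String) (seen : List String) (b : Int) :
    (b ∈ (seen.filter (fun s => PySem.Str.startswith word s)).map
        (fun s => PySem.Str.len s)) ↔
      0 ≤ b ∧ b ≤ (word.toList.length : Int) ∧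
        PySem.Str.slice word (some 0) (some b) ∈ seen := by
  constructor
  · rintro hb
    rcases List.mem_map.mp hb with ⟨s, hs, hlen⟩
    rcases List.mem_filter.mp hs with ⟨hsSeen, hsw⟩
    rw [PySem.Str.startswith_eq, PySem.Chars.startswith_iff] at hsw
    have hpre : s.toList = word.toList.take s.toList.length :=
      List.prefix_iff_eq_take.mp hsw
    have hle : s.toList.length ≤ word.toList.length := hsw.length_le
    have hlenb : b = (s.toList.length : Int) := by
      rw [← hlen]; simp [PySem.Str.len_eq]
    refine ⟨by omega, by omega, ?_⟩
    have : PySem.Str.slice word (some 0) (some b) = s := by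
      have h1 : (PySem.Str.slice word (some 0) (some b)).toList = s.toList := by
        rw [slice_zero_toList word b (by omega), hlenb, Int.toNat_natCast]
        exact hpre.symm
      have := congrArg String.ofList h1
      simpa using this
    rw [this]; exact hsSeen
  · rintro ⟨hb0, hbn, hmem⟩
    refine List.mem_map.mpr ⟨PySem.Str.slice word (some 0) (some b), ?_, ?_⟩
    · refine List.mem_filter.mpr ⟨hmem, ?_⟩
      rw [PySem.Str.startswith_eq, PySem.Chars.startswith_iff, slice_zero_toList word b hb0]
      exact List.take_prefix _ _
    · have hll : word.toList.length = word.length := String.length_toList (s := word)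
      simp [PySem.Str.len_eq, slice_zero_toList word b hb0]
      omega

-- ===== VERDICT (by name: the statement is the Claim_ definition above) =====
theorem useHistory_spec : Claim_equal_useHistory := by
  intro word seen _ hpre
  unfold Spec_useHistory useHistory useHistory_alt
  rw [loopA_eq_find, PySem.List.pyRange_neg_one_eq_reverse]
  simp only [neg_add_cancel]
  cases hf : ((PySem.List.pyRange 0 (PySem.Str.len word + 1) 1).reverse.find?
      (fun i => decide (PySem.Str.slice word (some 0) (some i) ∈ seen))) with
  | none =>
    exfalso
    obtain ⟨i, hi, hmem⟩ := hpre
    have hin : ((i : Int)) ∈ (PySem.List.pyRange 0 (PySem.Str.len word + 1) 1).reverse := by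
      rw [List.mem_reverse, PySem.List.mem_pyRange_one]
      refine ⟨Int.natCast_nonneg i, ?_⟩
      have hll : word.toList.length = word.length := String.length_toList (s := word)
      simp [PySem.Str.len_eq]; omega
    have hpi : decide (PySem.Str.slice word (some 0) (some (i : Int)) ∈ seen) = true := by
      rw [decide_eq_true_iff]
      have h1 : (PySem.Str.slice word (some 0) (some (i : Int))).toList =
          word.toList.take i := by
        rw [slice_zero_toList word _ (Int.natCast_nonneg i), Int.toNat_natCast]
      rw [← h1, String.ofList_toList] at hmem
      exact hmem
    have := List.find?_eq_none.mp hf _ hin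
    exact absurd hpi (by simp [this])
  | some i =>
    -- i is a match and the greatest one
    have hpi : PySem.Str.slice word (some 0) (some i) ∈ seen := by
      have := List.find?_some hf
      simpa using this
    have hiRange : 0 ≤ i ∧ i ≤ (word.toList.length : Int) := by
      have := List.mem_of_find?_eq_some hf
      rw [List.mem_reverse, PySem.List.mem_pyRange_one] at this
      have hll : word.toList.length = word.length := String.length_toList (s := word)
      simp [PySem.Str.len_eq] at this
      omega
    have hiL : i ∈ (seen.filter (fun s => PySem.Str.startswith word s)).map
        (fun s => PySem.Str.len s) :=
      (mem_lenList_iff word seen i).mpr ⟨hiRange.1, hiRange.2, hpi⟩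
    cases hm : PySem.List.max?
        ((seen.filter (fun s => PySem.Str.startswith word s)).map (fun s => PySem.Str.len s))
        (fun x => x) with
    | none =>
      exfalso
      rw [PySem.List.max?_eq_none_iff] at hm
      rw [hm] at hiL
      cases hiL
    | some m =>
      have hmL := PySem.List.max?_mem hm
      rw [mem_lenList_iff] at hmL
      have him : i ≤ m := PySem.List.max?_isMax hm i hiL
      have hmi : m ≤ i := by
        refine find?_pairwise_gt_max _ _ ?_ i hf m ?_ ?_
        · rw [List.pairwise_reverse]
          exact PySem.List.pairwise_lt_pyRange_one 0 (PySem.Str.len word + 1)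
        · rw [List.mem_reverse, PySem.List.mem_pyRange_one]
          refine ⟨hmL.1, ?_⟩
          have hll : word.toList.length = word.length := String.length_toList (s := word)
          simp [PySem.Str.len_eq]; omega
        · exact decide_eq_true hmL.2.2
      have : m = i := le_antisymm hmi him
      subst this
      simp only [PySem.List.length_pyRange_one]
      have hll : word.toList.length = word.length := String.length_toList (s := word)
      simp [PySem.Str.len_eq]
      omega
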